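-- pv_equiv track=rewrite | github.com/dstagroup/product-review-identification-and-generation-platform | pipeline&elasticsearch/ABSAModel.py | _GetDictAspect
-- ===== SOURCE A (Python) =====
-- def _GetDictAspect(y,mostCommonAspect):
--     position=[]
--     for innerlist in y:
--         position.append([i for i, j in enumerate(innerlist) if j == 1])
--     sortedCommon=sorted(mostCommonAspect)
--     dictAspect=[]
--     for innerlist in position:
--         i={}
--         for word in sortedCommon:
--             if sortedCommon.index(word) in innerlist:
--                 i[word]= 5
--             else:
--                 i[word]=0
--         dictAspect.append(i)
--     return dictAspect
-- ===== SOURCE B (Python) =====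
-- def _GetDictAspect(y, mostCommonAspect):
--     sortedCommon = sorted(mostCommonAspect)
--     # table: first-occurrence index -> word (later duplicate indices skipped)
--     first_index = {}
--     seen = set()
--     for idx, word in enumerate(sortedCommon):
--         if word not in seen:
--             seen.add(word)
--             first_index[idx] = word
--     result = []
--     for row in y:
--         d = {word: 0 for word in first_index.values()}
--         for pos, val in enumerate(row):
--             if val == 1 and pos in first_index:
--                 d[first_index[pos]] = 5
--         result.append(d)
--     return result
-- ===== Notes on version B (the rewrite author's own statement) =====
-- stated objective: faster
-- what changed: A scans every sorted aspect per row and calls list.index on each (quadratic in the aspect list per row); B precomputes a first-occurrence-index-to-word table once and fills each row's dict (all words 0) by a single pass over the row's positions equal to 1.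
import Mathlib
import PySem

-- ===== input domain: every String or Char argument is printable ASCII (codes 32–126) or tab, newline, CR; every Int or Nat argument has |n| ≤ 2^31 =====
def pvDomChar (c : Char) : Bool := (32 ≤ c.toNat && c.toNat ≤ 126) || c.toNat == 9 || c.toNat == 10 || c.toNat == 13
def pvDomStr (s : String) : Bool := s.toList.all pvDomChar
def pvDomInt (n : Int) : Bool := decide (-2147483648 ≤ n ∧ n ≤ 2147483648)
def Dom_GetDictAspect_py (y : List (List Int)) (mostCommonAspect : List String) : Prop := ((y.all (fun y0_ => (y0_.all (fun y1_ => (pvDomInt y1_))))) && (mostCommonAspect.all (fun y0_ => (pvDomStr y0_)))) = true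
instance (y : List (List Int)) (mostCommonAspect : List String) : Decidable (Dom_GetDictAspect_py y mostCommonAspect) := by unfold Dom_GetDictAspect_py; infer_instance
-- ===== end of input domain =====

-- B replaces A's per-row scan over every sorted aspect (with a repeated list.index) by a precomputed
-- first-occurrence-index → word table plus a single pass over each row's positions (objective: faster).

-- ===== PORT A =====
def GetDictAspect_py (y : List (List Int)) (mostCommonAspect : List String) : List (List (String × Int)) :=
  let position : List (List Int) :=
    y.foldl (fun acc innerlist =>
      acc ++ [((PySem.List.enumerate innerlist).filter (fun p => p.2 == 1)).map (·.1)]) []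
  let sortedCommon := PySem.List.sorted mostCommonAspect (fun x => x) false
  let dictAspect : List (List (String × Int)) :=
    position.foldl (fun acc innerlist =>
      let i : PySem.Dict String Int :=
        sortedCommon.foldl (fun d word =>
          match PySem.List.index? sortedCommon word with
          | some idx => if ((idx : Int) ∈ innerlist) then d.insert word (5 : Int) else d.insert word (0 : Int)
          | none => d) PySem.Dict.empty
      acc ++ [i.items]) []
  dictAspect

-- ===== PORT B =====
def GetDictAspect_py_alt (y : List (List Int)) (mostCommonAspect : List String) : List (List (String × Int)) :=
  let sortedCommon := PySem.List.sorted mostCommonAspect (fun x => x) false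
  let st := (PySem.List.enumerate sortedCommon).foldl
      (fun (st : PySem.Dict Int String × PySem.Set String) p =>
        if p.2 ∈ st.2 then st else (st.1.insert p.1 p.2, PySem.Set.add st.2 p.2))
      (PySem.Dict.empty, PySem.Set.empty)
  let firstIndex := st.1
  y.foldl (fun res row =>
    let d0 : PySem.Dict String Int :=
      firstIndex.values.foldl (fun d w => d.insert w (0 : Int)) PySem.Dict.empty
    let d : PySem.Dict String Int :=
      (PySem.List.enumerate row).foldl (fun d p =>
        if p.2 = (1 : Int) then
          match firstIndex.get? p.1 with
          | some w => d.insert w (5 : Int)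
          | none => d
        else d) d0
    res ++ [d.items]) []

-- ===== PRECONDITION & SPEC =====
def Spec_GetDictAspect_py (y : List (List Int)) (mostCommonAspect : List String) (out : List (List (String × Int))) : Prop := out = GetDictAspect_py_alt y mostCommonAspect
instance (y : List (List Int)) (mostCommonAspect : List String) (out : List (List (String × Int))) : Decidable (Spec_GetDictAspect_py y mostCommonAspect out) := by unfold Spec_GetDictAspect_py; infer_instance

-- ===== CLAIM (what is proved, stated in full; the proofs are below) =====
def Claim_equal_GetDictAspect_py : Prop := ∀ (y : List (List Int)) (mostCommonAspect : List String), Dom_GetDictAspect_py y mostCommonAspect → Spec_GetDictAspect_py y mostCommonAspect (GetDictAspect_py y mostCommonAspect)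

-- ===== LEMMAS AND PROOFS =====

theorem pv_insert_fold (f : String → Int) (l : List String) :
    ∀ (t : List String), t.Nodup →
      (l.foldl (fun d w => d.insert w (f w)) (PySem.Dict.mk (t.map (fun w => (w, f w))))).items
        = (PySem.Set.update t l).map (fun w => (w, f w)) := by
  induction l with
  | nil => intro t ht; simp [PySem.Set.update]
  | cons w l ih =>
    intro t ht
    simp only [List.foldl_cons]
    have hkeys : (PySem.Dict.mk (t.map (fun w => (w, f w)))).keys = t := by
      simp [PySem.Dict.keys, Function.comp_def]
    by_cases hw : w ∈ t
    · have hc : (PySem.Dict.mk (t.map (fun w => (w, f w)))).contains w = true := by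
        rw [PySem.Dict.contains_iff_mem_keys, hkeys]; exact hw
      have : (PySem.Dict.mk (t.map (fun w => (w, f w)))).insert w (f w)
          = PySem.Dict.mk (t.map (fun w => (w, f w))) := by
        apply PySem.Dict.ext
        rw [PySem.Dict.items_insert_of_contains _ _ hc]
        simp only [List.map_map]
        apply List.map_congr_left
        intro a ha
        by_cases h : a = w <;> simp [h]
      rw [this, ih t ht]
      have : PySem.Set.update t (w :: l) = PySem.Set.update t l := by
        rw [PySem.Set.update_cons, PySem.Set.add_of_mem hw]
      rw [this]
    · have hc : (PySem.Dict.mk (t.map (fun w => (w, f w)))).contains w = false := by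
        rw [← Bool.not_eq_true, PySem.Dict.contains_iff_mem_keys, hkeys]; exact hw
      have : (PySem.Dict.mk (t.map (fun w => (w, f w)))).insert w (f w)
          = PySem.Dict.mk ((t ++ [w]).map (fun w => (w, f w))) := by
        apply PySem.Dict.ext
        rw [PySem.Dict.items_insert_of_not_contains _ _ hc]
        simp
      rw [this, ih (t ++ [w]) (by simp [List.nodup_append, ht]; exact fun a ha h => hw (h ▸ ha))]
      rw [PySem.Set.update_cons, PySem.Set.add_of_not_mem hw]

def pvVal (s : List String) (inner : List Int) (w : String) : Int :=
  match PySem.List.index? s w with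
  | some idx => if ((idx : Int) ∈ inner) then (5 : Int) else 0
  | none => 0

theorem pv_A_row (s : List String) (inner : List Int) :
    (s.foldl (fun d word =>
        match PySem.List.index? s word with
        | some idx => if ((idx : Int) ∈ inner) then d.insert word (5 : Int) else d.insert word (0 : Int)
        | none => d) PySem.Dict.empty).items
      = (PySem.Set.ofList s).map (fun w => (w, pvVal s inner w)) := by
  have h := PySem.List.foldl_congr_mem
      (f := fun (d : PySem.Dict String Int) word =>
        match PySem.List.index? s word with
        | some idx => if ((idx : Int) ∈ inner) then d.insert word (5 : Int) else d.insert word (0 : Int)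
        | none => d)
      (g := fun (d : PySem.Dict String Int) word => d.insert word (pvVal s inner word))
      (l := s) (init := PySem.Dict.empty)
      (by
        intro d word hword
        have : (PySem.List.index? s word).isSome := (PySem.List.index?_isSome_iff s word).mpr hword
        obtain ⟨k, hk⟩ := Option.isSome_iff_exists.mp this
        simp only [pvVal, hk]
        by_cases hmem : ((k : Int) ∈ inner) <;> simp [hmem])
  rw [h]
  have h2 := pv_insert_fold (pvVal s inner) s [] (by simp)
  simpa [PySem.Set.update_nil_left] using h2

def pvFirstItems : List String → List String → Int → List (Int × String)
  | [], _, _ => []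
  | w :: ws, seen, n =>
    if w ∈ seen then pvFirstItems ws seen (n + 1)
    else (n, w) :: pvFirstItems ws (seen ++ [w]) (n + 1)

theorem pv_first_fold (s : List String) :
    ∀ (seen : List String) (n : Int) (D : PySem.Dict Int String), (∀ k ∈ D.keys, k < n) →
      ((PySem.List.enumerate s n).foldl
          (fun st p => if p.2 ∈ st.2 then st else (st.1.insert p.1 p.2, PySem.Set.add st.2 p.2))
          (D, seen))
        = (PySem.Dict.mk (D.items ++ pvFirstItems s seen n), PySem.Set.update seen s) := by
  induction s with
  | nil =>
    intro seen n D hD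
    simp [PySem.List.enumerate_nil, pvFirstItems, PySem.Set.update_nil]
  | cons w ws ih =>
    intro seen n D hD
    rw [PySem.List.enumerate_cons, List.foldl_cons, PySem.Set.update_cons]
    by_cases hw : w ∈ seen
    · simp only [hw, if_pos]
      rw [ih seen (n + 1) D (fun k hk => by have := hD k hk; omega)]
      rw [PySem.Set.add_of_mem hw]
      simp [pvFirstItems, hw]
    · simp only [hw, if_false]
      have hc : D.contains n = false := by
        rw [← Bool.not_eq_true, PySem.Dict.contains_iff_mem_keys]
        intro h; have := hD n h; omega
      have hins : D.insert n w = PySem.Dict.mk (D.items ++ [(n, w)]) := by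
        apply PySem.Dict.ext
        rw [PySem.Dict.items_insert_of_not_contains _ _ hc]
      rw [hins, PySem.Set.add_of_not_mem hw]
      rw [ih (seen ++ [w]) (n + 1) _ (by
        intro k hk
        simp only [PySem.Dict.keys, List.map_append, List.mem_append, List.map_cons] at hk
        rcases hk with hk | hk
        · have := hD k hk; omega
        · simp at hk; omega)]
      simp [pvFirstItems, hw]

theorem pv_firstItems_values (s : List String) :
    ∀ (seen : List String) (n : Int),
      seen ++ (pvFirstItems s seen n).map (·.2) = PySem.Set.update seen s := by
  induction s with
  | nil => intro seen n; simp [pvFirstItems, PySem.Set.update_nil]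
  | cons w ws ih =>
    intro seen n
    rw [PySem.Set.update_cons]
    by_cases hw : w ∈ seen
    · rw [PySem.Set.add_of_mem hw]
      simpa [pvFirstItems, hw] using ih seen (n + 1)
    · rw [PySem.Set.add_of_not_mem hw]
      have := ih (seen ++ [w]) (n + 1)
      simp only [pvFirstItems, hw, if_false, List.map_cons]
      simpa using this

theorem pv_firstItems_keys_lt (s : List String) :
    ∀ (seen : List String) (n : Int) (p : Int × String), p ∈ pvFirstItems s seen n → n ≤ p.1 := by
  induction s with
  | nil => intro seen n p hp; simp [pvFirstItems] at hp
  | cons w ws ih =>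
    intro seen n p hp
    simp only [pvFirstItems] at hp
    by_cases hw : w ∈ seen
    · rw [if_pos hw] at hp; have := ih seen (n + 1) p hp; omega
    · rw [if_neg hw] at hp
      rcases List.mem_cons.mp hp with h | h
      · subst h; simp
      · have := ih (seen ++ [w]) (n + 1) p h; omega

theorem pv_firstItems_keys_nodup (s : List String) :
    ∀ (seen : List String) (n : Int), ((pvFirstItems s seen n).map (·.1)).Nodup := by
  induction s with
  | nil => intro seen n; simp [pvFirstItems]
  | cons w ws ih =>
    intro seen n
    simp only [pvFirstItems]
    by_cases hw : w ∈ seen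
    · rw [if_pos hw]; exact ih seen (n + 1)
    · rw [if_neg hw]
      simp only [List.map_cons, List.nodup_cons]
      refine ⟨?_, ih (seen ++ [w]) (n + 1)⟩
      intro h
      rcases List.mem_map.mp h with ⟨p, hp, hpn⟩
      have := pv_firstItems_keys_lt ws (seen ++ [w]) (n + 1) p hp
      omega

theorem pv_firstItems_mem (s : List String) :
    ∀ (seen : List String) (n j : Int) (w : String),
      (j, w) ∈ pvFirstItems s seen n ↔
        (w ∉ seen ∧ ∃ k : Nat, PySem.List.index? s w = some k ∧ j = n + k) := by
  induction s with
  | nil =>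
    intro seen n j w
    simp [pvFirstItems]
  | cons x ws ih =>
    intro seen n j w
    simp only [pvFirstItems]
    by_cases hx : x ∈ seen
    · rw [if_pos hx, ih seen (n + 1) j w]
      constructor
      · rintro ⟨hw, k, hk, hj⟩
        have hne : x ≠ w := fun h => hw (h ▸ hx)
        refine ⟨hw, k + 1, ?_, by push_cast; omega⟩
        rw [PySem.List.index?_cons_of_ne _ hne, hk]; rfl
      · rintro ⟨hw, k, hk, hj⟩
        have hne : x ≠ w := fun h => hw (h ▸ hx)
        rw [PySem.List.index?_cons_of_ne _ hne] at hk
        rcases Option.map_eq_some_iff.mp hk with ⟨k', hk', hkk⟩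
        exact ⟨hw, k', hk', by omega⟩
    · rw [if_neg hx]
      by_cases hxw : x = w
      · subst hxw
        rw [List.mem_cons]
        constructor
        · rintro (h | h)
          · obtain ⟨h1, h2⟩ := Prod.mk.injEq .. ▸ h
            refine ⟨hx, 0, by rw [PySem.List.index?_cons_self], by simp_all⟩
          · have := (ih (seen ++ [x]) (n + 1) j x).mp h
            simp at this
        · rintro ⟨hw, k, hk, hj⟩
          rw [PySem.List.index?_cons_self] at hk
          left
          have : k = 0 := by simpa using hk.symm
          subst this; simp at hj; simp [hj]
      · rw [List.mem_cons, ih (seen ++ [x]) (n + 1) j w]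
        constructor
        · rintro (h | ⟨hw, k, hk, hj⟩)
          · exact absurd (congrArg Prod.snd h).symm hxw
          · simp only [List.mem_append, List.mem_singleton, not_or] at hw
            refine ⟨hw.1, k + 1, ?_, by push_cast; omega⟩
            rw [PySem.List.index?_cons_of_ne _ hxw, hk]; rfl
        · rintro ⟨hw, k, hk, hj⟩
          rw [PySem.List.index?_cons_of_ne _ hxw] at hk
          rcases Option.map_eq_some_iff.mp hk with ⟨k', hk', hkk⟩
          right
          refine ⟨by simp [hw, Ne.symm hxw], k', hk', by omega⟩

theorem pv_row_fold (D : PySem.Dict Int String) (t : List String)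
    (hmem : ∀ j w, D.get? j = some w → w ∈ t) (l : List (Int × Int)) :
    ∀ (h : String → Int),
      (l.foldl (fun d p =>
          if p.2 = (1 : Int) then
            match D.get? p.1 with
            | some w => d.insert w (5 : Int)
            | none => d
          else d) (PySem.Dict.mk (t.map (fun w => (w, h w))))).items
        = t.map (fun w => (w, if (∃ p ∈ l, p.2 = 1 ∧ D.get? p.1 = some w) then 5 else h w)) := by
  induction l with
  | nil => intro h; simp
  | cons p l ih =>
    intro h
    rw [List.foldl_cons]
    by_cases hp : p.2 = (1 : Int)
    · rw [if_pos hp]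
      cases hD : D.get? p.1 with
      | none =>
        rw [ih h]
        apply List.map_congr_left
        intro w hw
        have : (∃ q ∈ p :: l, q.2 = 1 ∧ D.get? q.1 = some w) ↔ (∃ q ∈ l, q.2 = 1 ∧ D.get? q.1 = some w) := by
          constructor
          · rintro ⟨q, hq, h1, h2⟩
            rcases List.mem_cons.mp hq with rfl | hq'
            · rw [hD] at h2; cases h2
            · exact ⟨q, hq', h1, h2⟩
          · rintro ⟨q, hq, h1, h2⟩; exact ⟨q, List.mem_cons_of_mem _ hq, h1, h2⟩
        rw [if_congr this rfl rfl]
      | some w0 =>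
        have hw0 : w0 ∈ t := hmem _ _ hD
        have hc : (PySem.Dict.mk (t.map (fun w => (w, h w)))).contains w0 = true := by
          rw [PySem.Dict.contains_iff_mem_keys]
          simp [PySem.Dict.keys, Function.comp_def, hw0]
        have hins : (PySem.Dict.mk (t.map (fun w => (w, h w)))).insert w0 (5 : Int)
            = PySem.Dict.mk (t.map (fun w => (w, if w = w0 then (5 : Int) else h w))) := by
          apply PySem.Dict.ext
          rw [PySem.Dict.items_insert_of_contains _ _ hc]
          simp only [List.map_map]
          apply List.map_congr_left
          intro a _
          by_cases hA : a = w0 <;> simp [hA]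
        dsimp only
        rw [hins, ih (fun w => if w = w0 then (5 : Int) else h w)]
        apply List.map_congr_left
        intro w hw
        by_cases hl : ∃ q ∈ l, q.2 = 1 ∧ D.get? q.1 = some w
        · have h1 : (∃ q ∈ p :: l, q.2 = 1 ∧ D.get? q.1 = some w) := by
            obtain ⟨q, hq, hh⟩ := hl; exact ⟨q, List.mem_cons_of_mem _ hq, hh⟩
          rw [if_pos hl, if_pos h1]
        · rw [if_neg hl]
          by_cases hww : w = w0
          · subst hww
            have h1 : (∃ q ∈ p :: l, q.2 = 1 ∧ D.get? q.1 = some w) :=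
              ⟨p, List.mem_cons_self, hp, hD⟩
            rw [if_pos rfl, if_pos h1]
          · have h1 : ¬ (∃ q ∈ p :: l, q.2 = 1 ∧ D.get? q.1 = some w) := by
              rintro ⟨q, hq, hq1, hq2⟩
              rcases List.mem_cons.mp hq with rfl | hq'
              · rw [hD] at hq2
                exact hww (Option.some.inj hq2).symm
              · exact hl ⟨q, hq', hq1, hq2⟩
            rw [if_neg h1, if_neg hww]
    · rw [if_neg hp, ih h]
      apply List.map_congr_left
      intro w hw
      have : (∃ q ∈ p :: l, q.2 = 1 ∧ D.get? q.1 = some w) ↔ (∃ q ∈ l, q.2 = 1 ∧ D.get? q.1 = some w) := by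
        constructor
        · rintro ⟨q, hq, h1, h2⟩
          rcases List.mem_cons.mp hq with rfl | hq'
          · exact absurd h1 hp
          · exact ⟨q, hq', h1, h2⟩
        · rintro ⟨q, hq, hh⟩; exact ⟨q, List.mem_cons_of_mem _ hq, hh⟩
      rw [if_congr this rfl rfl]

theorem pv_main (y : List (List Int)) (m : List String) :
    GetDictAspect_py y m = GetDictAspect_py_alt y m := by
  unfold GetDictAspect_py GetDictAspect_py_alt
  simp only [PySem.List.foldl_append_singleton_eq_map, List.nil_append, List.map_map]
  set s := PySem.List.sorted m (fun x => x) false with hs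
  -- characterize B's table
  rw [show (PySem.Set.empty : PySem.Set String) = [] from rfl]
  have hst := pv_first_fold s [] 0 PySem.Dict.empty
      (by simp [PySem.Dict.empty, PySem.Dict.keys])
  rw [hst]
  apply List.map_congr_left
  intro row _
  dsimp only [Function.comp]
  set D : PySem.Dict Int String := PySem.Dict.mk (PySem.Dict.empty.items ++ pvFirstItems s [] 0) with hD
  have hDitems : D.items = pvFirstItems s [] 0 := by simp [hD, PySem.Dict.empty]
  have hvals : D.values = PySem.Set.ofList s := by
    have := pv_firstItems_values s [] 0
    simp only [List.nil_append] at this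
    simp [PySem.Dict.values, hDitems, this, PySem.Set.update_nil_left]
  have hknd : D.keys.Nodup := by
    simp only [PySem.Dict.keys, hDitems]
    exact pv_firstItems_keys_nodup s [] 0
  have hget : ∀ j w, D.get? j = some w ↔ (j, w) ∈ pvFirstItems s [] 0 := by
    intro j w
    rw [PySem.Dict.get?_eq_some_iff_mem_items D j w hknd, hDitems]
  -- d0
  have hnods : (PySem.Set.ofList s).Nodup := PySem.Set.nodup_ofList s
  have hd0 : (D.values.foldl (fun d w => d.insert w (0 : Int)) PySem.Dict.empty)
      = PySem.Dict.mk ((PySem.Set.ofList s).map (fun w => (w, (0 : Int)))) := by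
    apply PySem.Dict.ext
    rw [hvals]
    have := pv_insert_fold (fun _ => (0 : Int)) (PySem.Set.ofList s) [] (by simp)
    simp only [List.map_nil] at this
    rw [show (PySem.Dict.mk ([] : List (String × Int))) = PySem.Dict.empty from rfl] at this
    rw [this, PySem.Set.update_nil_left, PySem.Set.ofList_ofList]
  rw [hd0]
  have hmem : ∀ j w, D.get? j = some w → w ∈ PySem.Set.ofList s := by
    intro j w h
    have := (hget j w).mp h
    have hv : w ∈ (pvFirstItems s [] 0).map (·.2) := List.mem_map.mpr ⟨(j, w), this, rfl⟩
    rw [← hDitems] at hv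
    rw [← hvals]; exact hv
  rw [pv_row_fold D (PySem.Set.ofList s) hmem (PySem.List.enumerate row) (fun _ => 0)]
  rw [pv_A_row s (((PySem.List.enumerate row).filter (fun p => p.2 == 1)).map (·.1))]
  apply List.map_congr_left
  intro w hw
  have hws : w ∈ s := (PySem.Set.mem_ofList s w).mp hw
  obtain ⟨k, hk⟩ := Option.isSome_iff_exists.mp ((PySem.List.index?_isSome_iff s w).mpr hws)
  have hcond : ((k : Int) ∈ ((PySem.List.enumerate row).filter (fun p => p.2 == 1)).map (·.1))
      ↔ (∃ p ∈ PySem.List.enumerate row, p.2 = 1 ∧ D.get? p.1 = some w) := by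
    constructor
    · intro h
      rcases List.mem_map.mp h with ⟨p, hp, hpk⟩
      rcases List.mem_filter.mp hp with ⟨hp1, hp2⟩
      refine ⟨p, hp1, by simpa using hp2, ?_⟩
      rw [hget]
      rw [pv_firstItems_mem]
      exact ⟨by simp, k, hk, by rw [hpk]; ring⟩
    · rintro ⟨p, hp, hp1, hp2⟩
      rw [hget, pv_firstItems_mem] at hp2
      obtain ⟨-, k', hk', hpk⟩ := hp2
      have : k' = k := by rw [hk] at hk'; exact (Option.some.inj hk').symm
      subst this
      refine List.mem_map.mpr ⟨p, List.mem_filter.mpr ⟨hp, by simpa using hp1⟩, by omega⟩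
  simp only [pvVal, hk]
  rw [if_congr hcond rfl rfl]

-- ===== VERDICT (by name: the statement is the Claim_ definition above) =====
theorem GetDictAspect_py_spec : Claim_equal_GetDictAspect_py := by
  intro y m _
  unfold Spec_GetDictAspect_py
  exact pv_main y m
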